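-- pv_equiv track=rewrite | github.com/mr875/mapcheck | mapcomp/ce.py | rs_mult
-- ===== SOURCE A (Python) =====
-- def rs_mult(mval,dlim=','):
--     arr = mval.split(dlim)
--     if len(arr) < 2:
--         return arr[0],[]
--     nums = [int(rs.replace('rs','')) for rs in arr]
--     smallest = min(nums)
--     ind = nums.index(smallest)
--     chosen = arr.pop(ind)
--     return chosen,arr
-- ===== SOURCE B (Python) =====
-- def rs_mult(mval, dlim=','):
--     arr = mval.split(dlim)
--     if len(arr) < 2:
--         return arr[0], []
--     order = sorted(range(len(arr)), key=lambda i: int(arr[i].replace('rs', '')))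
--     j = order[0]
--     return arr[j], arr[:j] + arr[j + 1:]
-- ===== Notes on version B (the rewrite author's own statement) =====
-- stated objective: alternative
-- what changed: B replaces A's build-parsed-int-list / min / list.index / pop pipeline by a decorate-sort pass: it stably sorts the index permutation by parsed value, takes the first index, and removes it with two slices.
import Mathlib
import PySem

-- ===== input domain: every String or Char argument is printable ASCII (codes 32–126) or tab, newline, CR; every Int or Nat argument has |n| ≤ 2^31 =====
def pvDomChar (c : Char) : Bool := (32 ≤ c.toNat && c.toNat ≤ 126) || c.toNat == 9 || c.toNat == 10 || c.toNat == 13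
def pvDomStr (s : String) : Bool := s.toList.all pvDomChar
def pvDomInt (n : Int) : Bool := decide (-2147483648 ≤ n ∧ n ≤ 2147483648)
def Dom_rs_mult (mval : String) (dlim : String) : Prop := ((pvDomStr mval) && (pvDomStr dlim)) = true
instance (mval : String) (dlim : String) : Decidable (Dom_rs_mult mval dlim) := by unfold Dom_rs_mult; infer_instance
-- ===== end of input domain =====

-- B replaces A's build-parsed-list / min / index / pop pipeline by a decorate-sort pass: stably sort
-- the index permutation by parsed value, take the first index, remove it with two slices. Same result;
-- a different algorithm, not claimed faster. (A's arr.pop mutates only a list local to the call.)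

-- int(rs.replace('rs','')) ; the .getD 0 default is unreachable under Pre_rs_mult
def pvParse (rs : String) : Int := (PySem.Int.ofStr? (PySem.Str.replace rs "rs" "")).getD 0

-- ===== PORT A =====
def rs_mult (mval : String) (dlim : String) : String × List String :=
  let arr := (PySem.Str.split? mval dlim).getD []   -- none (dlim = "") is excluded by Pre_rs_mult
  if arr.length < 2 then ((PySem.List.pyGet? arr 0).getD "", [])
  else
    let nums := arr.map pvParse
    let smallest := (PySem.List.min? nums (fun y => y)).getD 0
    let ind := (PySem.List.index? nums smallest).getD 0
    (PySem.List.pop? arr (ind : Int)).getD ("", [])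

-- ===== PORT B =====
def rs_mult_alt (mval : String) (dlim : String) : String × List String :=
  let arr := (PySem.Str.split? mval dlim).getD []   -- none (dlim = "") is excluded by Pre_rs_mult
  if arr.length < 2 then ((PySem.List.pyGet? arr 0).getD "", [])
  else
    let order := PySem.List.sorted (PySem.List.pyRange 0 (PySem.List.len arr) 1)
                   (fun i => pvParse (PySem.List.pyGetD arr i ""))
    let j := (PySem.List.pyGet? order 0).getD 0
    (PySem.List.pyGetD arr j "",
     PySem.List.slice arr none (some j) ++ PySem.List.slice arr (some (j + 1)) none)

-- ===== PRECONDITION & SPEC =====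
-- Pre_ excludes exactly the inputs where Python A raises: an empty delimiter (split ValueError) and, when
-- the split yields at least two parts, a part that is not an int literal once the marker letters are deleted
-- (int ValueError).
def Pre_rs_mult (mval : String) (dlim : String) : Prop :=
  dlim ≠ "" ∧
    (2 ≤ ((PySem.Str.split? mval dlim).getD []).length →
      ∀ rs ∈ (PySem.Str.split? mval dlim).getD [],
        (PySem.Int.ofStr? (PySem.Str.replace rs "rs" "")).isSome = true)
instance (mval : String) (dlim : String) : Decidable (Pre_rs_mult mval dlim) := by
  unfold Pre_rs_mult; infer_instance

def pvWitness_rs_mult : String × String := ("rs3,4,rs-1", ",")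

def Spec_rs_mult (mval : String) (dlim : String) (out : String × List String) : Prop := out = rs_mult_alt mval dlim
instance (mval : String) (dlim : String) (out : String × List String) : Decidable (Spec_rs_mult mval dlim out) := by unfold Spec_rs_mult; infer_instance

-- ===== CLAIM (what is proved, stated in full; the proofs are below) =====
def Claim_equal_rs_mult : Prop := ∀ (mval : String) (dlim : String), Dom_rs_mult mval dlim → Pre_rs_mult mval dlim → Spec_rs_mult mval dlim (rs_mult mval dlim)

-- ===== LEMMAS AND PROOFS =====

-- first argmin of f over a list, with its index (proof-only reference function)
def pvAmin {A : Type} (f : A -> Int) : List A -> Option (A × Nat)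
  | [] => none
  | x :: t =>
    match pvAmin f t with
    | none => some (x, 0)
    | some (c, k) => if f x <= f c then some (x, 0) else some (c, k + 1)

lemma pvAmin_eq_none {A : Type} (f : A -> Int) (l : List A) : pvAmin f l = none ↔ l = [] := by
  cases l with
  | nil => simp [pvAmin]
  | cons x t =>
    simp only [pvAmin]
    cases pvAmin f t with
    | none => simp
    | some p => cases p with | mk c k => by_cases h : f x <= f c <;> simp [h]

lemma min?_cons_cons {A : Type} (f : A -> Int) (a x : A) (t : List A) :
    PySem.List.min? (a :: x :: t) f = PySem.List.min? ((if f x < f a then x else a) :: t) f := by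
  by_cases hx : f x < f a <;> simp [PySem.List.min?, hx]

lemma min?_eq_pvAmin_head {A : Type} (f : A -> Int) (t : List A) :
    ∀ a : A, PySem.List.min? (a :: t) f
      = match pvAmin f t with
        | none => some a
        | some (c, _) => if f c < f a then some c else some a := by
  induction t with
  | nil => intro a; simp [PySem.List.min?, pvAmin]
  | cons x t ih =>
    intro a
    rw [min?_cons_cons, ih]
    simp only [pvAmin]
    cases h : pvAmin f t with
    | none => simp only []; split_ifs <;> rfl
    | some p =>
      cases p with
      | mk c k =>
        simp only []
        by_cases hxc : f x <= f c
        · rw [if_pos hxc]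
          simp only []
          split_ifs <;> first | rfl | (exfalso; omega)
        · rw [if_neg hxc]
          simp only []
          split_ifs <;> first | rfl | (exfalso; omega)

lemma min?_eq_pvAmin {A : Type} (f : A -> Int) (l : List A) :
    PySem.List.min? l f = (pvAmin f l).map Prod.fst := by
  cases l with
  | nil => simp [PySem.List.min?, pvAmin]
  | cons x t =>
    rw [min?_eq_pvAmin_head]
    simp only [pvAmin]
    cases h : pvAmin f t with
    | none => rfl
    | some p =>
      cases p with
      | mk c k => simp only []; split_ifs <;> first | rfl | (exfalso; omega)

-- argmin of the key list through a map
lemma pvAmin_map {A B : Type} (g : A -> B) (f : B -> Int) (l : List A) :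
    pvAmin f (l.map g) = (pvAmin (fun a => f (g a)) l).map (fun p => (g p.1, p.2)) := by
  induction l with
  | nil => simp [pvAmin]
  | cons x t ih =>
    simp only [List.map_cons, pvAmin, ih]
    cases h : pvAmin (fun a => f (g a)) t with
    | none => rfl
    | some p =>
      cases p with
      | mk c k => by_cases hx : f (g x) <= f (g c) <;> simp [hx]

lemma pvAmin_index {A : Type} [BEq A] [LawfulBEq A] (f : A -> Int) (l : List A) (c : A) (k : Nat)
    (h : pvAmin f l = some (c, k)) :
    PySem.List.index? (l.map f) (f c) = some k := by
  induction l generalizing c k with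
  | nil => simp [pvAmin] at h
  | cons x t ih =>
    simp only [pvAmin] at h
    cases ht : pvAmin f t with
    | none =>
      rw [ht] at h
      simp only [] at h
      simp only [Option.some.injEq, Prod.mk.injEq] at h
      obtain ⟨rfl, rfl⟩ := h
      rw [List.map_cons, PySem.List.index?_cons_self]
    | some p =>
      cases p with
      | mk c' k' =>
        rw [ht] at h
        simp only [] at h
        by_cases hx : f x <= f c'
        · rw [if_pos hx] at h
          simp only [Option.some.injEq, Prod.mk.injEq] at h
          obtain ⟨rfl, rfl⟩ := h
          rw [List.map_cons, PySem.List.index?_cons_self]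
        · rw [if_neg hx] at h
          simp only [Option.some.injEq, Prod.mk.injEq] at h
          obtain ⟨rfl, rfl⟩ := h
          have hne : f x ≠ f c' := by omega
          rw [List.map_cons, PySem.List.index?_cons_of_ne (List.map f t) hne, ih c' k' ht]
          rfl

lemma pvAmin_get {A : Type} (f : A -> Int) (l : List A) (c : A) (k : Nat)
    (h : pvAmin f l = some (c, k)) :
    ∃ hk : k < l.length, l[k] = c := by
  induction l generalizing c k with
  | nil => simp [pvAmin] at h
  | cons x t ih =>
    simp only [pvAmin] at h
    cases ht : pvAmin f t with
    | none =>
      rw [ht] at h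
      simp only [] at h
      simp only [Option.some.injEq, Prod.mk.injEq] at h
      obtain ⟨rfl, rfl⟩ := h
      exact ⟨by simp, by simp⟩
    | some p =>
      cases p with
      | mk c' k' =>
        rw [ht] at h
        simp only [] at h
        by_cases hx : f x <= f c'
        · rw [if_pos hx] at h
          simp only [Option.some.injEq, Prod.mk.injEq] at h
          obtain ⟨rfl, rfl⟩ := h
          exact ⟨by simp, by simp⟩
        · rw [if_neg hx] at h
          simp only [Option.some.injEq, Prod.mk.injEq] at h
          obtain ⟨rfl, rfl⟩ := h
          obtain ⟨hk, hget⟩ := ih c' k' ht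
          exact ⟨by simpa using Nat.succ_lt_succ hk, by simpa using hget⟩

-- merging the two leading elements does not change the first argmin element
lemma pvAmin_fst_cons_cons {A : Type} (f : A -> Int) (c x : A) (l : List A) :
    (pvAmin f (c :: x :: l)).map Prod.fst
      = (pvAmin f ((if f x < f c then x else c) :: l)).map Prod.fst := by
  cases hl : pvAmin f l with
  | none =>
    by_cases h1 : f x < f c
    · have h4 : ¬ f c ≤ f x := by omega
      simp [pvAmin, hl, h1, h4]
    · have h4 : f c ≤ f x := by omega
      simp [pvAmin, hl, h1, h4]
  | some p =>
    cases p with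
    | mk c' k =>
      by_cases h1 : f x < f c <;> by_cases h2 : f x ≤ f c' <;> by_cases h3 : f c ≤ f c' <;>
        [ (have h4 : ¬ f c ≤ f x := by omega); (have h4 : ¬ f c ≤ f x := by omega);
          (have h4 : ¬ f c ≤ f x := by omega); (have h4 : ¬ f c ≤ f x := by omega);
          (have h4 : f c ≤ f x := by omega); (have h4 : f c ≤ f x := by omega);
          (have h4 : f c ≤ f x := by omega); (have h4 : f c ≤ f x := by omega) ] <;>
        (simp [pvAmin, hl, h1, h2, h3, h4]; try omega)

-- the left-to-right running argmin (strict replacement) computes the first argmin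
lemma foldl_step_eq_pvAmin {A : Type} (f : A -> Int) (l : List A) :
    ∀ c : A, l.foldl (fun c x => if f x < f c then x else c) c
      = ((pvAmin f (c :: l)).map Prod.fst).getD c := by
  induction l with
  | nil => intro c; simp [pvAmin]
  | cons x t ih =>
    intro c
    have := pvAmin_fst_cons_cons f c x t
    rw [List.foldl_cons, ih (if f x < f c then x else c), ← this]
    cases h : pvAmin f (c :: x :: t) with
    | none => exact absurd ((pvAmin_eq_none f _).mp h) (by simp)
    | some p => simp

-- head of PySem's insertion step
lemma insertBy_cons {A : Type} (bef : A -> A -> Bool) (x y : A) (ys : List A) :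
    PySem.List.insertBy bef x (y :: ys)
      = if bef x y then x :: y :: ys else y :: PySem.List.insertBy bef x ys := rfl

lemma insertBy_cons_head {A : Type} (bef : A -> A -> Bool) (x y : A) (ys : List A) :
    ∃ t, PySem.List.insertBy bef x (y :: ys) = (if bef x y then x else y) :: t := by
  rw [insertBy_cons]
  by_cases h : bef x y
  · exact ⟨y :: ys, by simp [h]⟩
  · exact ⟨PySem.List.insertBy bef x ys, by simp [h]⟩

-- head of the insertion-sort fold: the left-to-right strict running minimum
lemma head_foldl_insertBy {A : Type} (bef : A -> A -> Bool) (l : List A) :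
    ∀ (c : A) (rest : List A),
      ∃ t, l.foldl (fun acc x => PySem.List.insertBy bef x acc) (c :: rest)
            = (l.foldl (fun c x => if bef x c then x else c) c) :: t := by
  induction l with
  | nil => intro c rest; exact ⟨rest, rfl⟩
  | cons x l ih =>
    intro c rest
    obtain ⟨t0, ht0⟩ := insertBy_cons_head bef x c rest
    obtain ⟨t, ht⟩ := ih (if bef x c then x else c) t0
    exact ⟨t, by simp only [List.foldl_cons, ht0, ht]⟩

-- head of sorted(l, key) is the first argmin of key
lemma sorted_head_eq_pvAmin {A : Type} (key : A -> Int) (c : A) (l : List A) :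
    ∃ t, PySem.List.sorted (c :: l) key false
          = (((pvAmin key (c :: l)).map Prod.fst).getD c) :: t := by
  rw [PySem.List.sorted_eq_foldl_insertBy]
  simp only [List.foldl_cons, PySem.List.insertBy]
  obtain ⟨t, ht⟩ := head_foldl_insertBy (fun a b => decide (key a < key b)) l c []
  have hfun : (fun (c' : A) (x : A) => if decide (key x < key c') = true then x else c')
      = fun (c' : A) (x : A) => if key x < key c' then x else c' := by
    funext a b; simp
  rw [hfun] at ht
  exact ⟨t, by rw [ht, foldl_step_eq_pvAmin key l c]⟩

-- pyRange 0 n 1 at a natural position k is k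
lemma pyRange_zero_getElem? (n k : Nat) (hk : k < n) :
    (PySem.List.pyRange 0 (n : Int) 1)[k]? = some (k : Int) := by
  rw [PySem.List.pyRange_zero_natCast]
  simp [hk]

-- the two nonempty-list branches of the ports agree
lemma rs_mult_branch_eq (arr : List String) (h2 : 2 <= arr.length) :
    (PySem.List.pop? arr
        (((PySem.List.index? (arr.map pvParse)
            ((PySem.List.min? (arr.map pvParse) (fun y => y)).getD 0)).getD 0 : Nat) : Int)).getD ("", [])
      = (let order := PySem.List.sorted (PySem.List.pyRange 0 (PySem.List.len arr) 1)
                        (fun i => pvParse (PySem.List.pyGetD arr i ""))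
         let j := (PySem.List.pyGet? order 0).getD 0
         (PySem.List.pyGetD arr j "",
          PySem.List.slice arr none (some j) ++ PySem.List.slice arr (some (j + 1)) none)) := by
  have hne : arr ≠ [] := by cases arr <;> simp_all
  -- the index list and its map back to arr
  have hlen : PySem.List.len arr = ((arr.length : Nat) : Int) := by
    simp [PySem.List.len_eq]
  have hmaparr : (PySem.List.pyRange 0 (PySem.List.len arr) 1).map
      (fun i => PySem.List.pyGetD arr i "") = arr := by
    simpa using PySem.List.map_pyGetD_pyRange_zero arr ""
  -- A's argmin over arr
  obtain ⟨⟨c, k⟩, ha⟩ : ∃ p, pvAmin pvParse arr = some p := by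
    cases hp : pvAmin pvParse arr with
    | none => exact absurd ((pvAmin_eq_none pvParse arr).mp hp) hne
    | some p => exact ⟨p, rfl⟩
  have hminmap : PySem.List.min? (arr.map pvParse) (fun y => y) = some (pvParse c) := by
    rw [min?_eq_pvAmin, pvAmin_map pvParse (fun y => y) arr, ha]; simp
  have hidx : PySem.List.index? (arr.map pvParse) (pvParse c) = some k := pvAmin_index pvParse arr c k ha
  obtain ⟨hk, hget⟩ := pvAmin_get pvParse arr c k ha
  -- the argmin over the index list projects to (j, k) with j = k
  have hamini : pvAmin pvParse ((PySem.List.pyRange 0 (PySem.List.len arr) 1).map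
      (fun i => PySem.List.pyGetD arr i "")) = some (c, k) := by rw [hmaparr]; exact ha
  rw [pvAmin_map] at hamini
  obtain ⟨⟨j, k'⟩, hj⟩ : ∃ p, pvAmin (fun i => pvParse (PySem.List.pyGetD arr i ""))
      (PySem.List.pyRange 0 (PySem.List.len arr) 1) = some p := by
    cases hp : pvAmin (fun i => pvParse (PySem.List.pyGetD arr i ""))
        (PySem.List.pyRange 0 (PySem.List.len arr) 1) with
    | none => rw [hp] at hamini; simp at hamini
    | some p => exact ⟨p, rfl⟩
  rw [hj] at hamini
  simp only [Option.map_some, Option.some.injEq, Prod.mk.injEq] at hamini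
  obtain ⟨hgj, hk2⟩ := hamini
  subst hk2
  have hjk : j = (k' : Int) := by
    obtain ⟨hklen, hkel⟩ := pvAmin_get _ _ j k' hj
    have hkel2 : (PySem.List.pyRange 0 (PySem.List.len arr) 1)[k']? = some j := by
      rw [List.getElem?_eq_getElem hklen, hkel]
    rw [hlen, pyRange_zero_getElem? arr.length k' hk] at hkel2
    exact (Option.some.injEq _ _ ▸ hkel2).symm
  -- B's head of the sorted index list is j
  obtain ⟨i0, it, hrange⟩ : ∃ i0 it, PySem.List.pyRange 0 (PySem.List.len arr) 1 = i0 :: it := by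
    cases hr : PySem.List.pyRange 0 (PySem.List.len arr) 1 with
    | nil => rw [hr] at hmaparr; simp only [List.map_nil] at hmaparr; exact absurd hmaparr.symm hne
    | cons i0 it => exact ⟨i0, it, rfl⟩
  obtain ⟨t, hsorted⟩ := sorted_head_eq_pvAmin (fun i => pvParse (PySem.List.pyGetD arr i "")) i0 it
  rw [hrange] at hj
  rw [hj] at hsorted
  simp only [Option.map_some, Option.getD_some] at hsorted
  -- evaluate both sides
  rw [hminmap]
  simp only [Option.getD_some]
  rw [hidx]
  simp only [Option.getD_some]
  rw [PySem.List.pop?_natCast arr k' hk]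
  simp only [Option.getD_some, hrange, hsorted, PySem.List.pyGet?_zero_cons, Option.getD_some, hjk]
  have h1 : PySem.List.pyGetD arr ((k' : Nat) : Int) "" = arr[k'] := by
    rw [PySem.List.pyGetD_natCast]; simp [hk]
  have h2 : PySem.List.slice arr none (some ((k' : Nat) : Int)) = arr.take k' :=
    PySem.List.slice_to_natCast arr k'
  have h3 : PySem.List.slice arr (some (((k' : Nat) : Int) + 1)) none = arr.drop (k' + 1) := by
    have : ((k' : Nat) : Int) + 1 = (((k' + 1 : Nat)) : Int) := by push_cast; ring
    rw [this, PySem.List.slice_from_natCast]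
  rw [h1, h2, h3, hget, List.eraseIdx_eq_take_drop_succ]

-- ===== VERDICT (by name: the statement is the Claim_ definition above) =====
theorem rs_mult_spec : Claim_equal_rs_mult := by
  intro mval dlim _hdom _hpre
  unfold Spec_rs_mult rs_mult rs_mult_alt
  by_cases h : ((PySem.Str.split? mval dlim).getD []).length < 2
  · simp only [h, if_pos]
  · simp only [h, if_neg, not_false_iff]
    exact rs_mult_branch_eq _ (by omega)
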